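-- pv_equiv track=rewrite | github.com/JaySalma/Python_Advent_of_Code | Day6_2.py | group_separation
-- ===== SOURCE A (Python) =====
-- def common_answers(group_string,number_of_persons):
--     common_answer=""
--     for char in group_string:
--         if group_string.count(char)==number_of_persons and not(char in common_answer):
--             common_answer+=char
--     next
--     return common_answer
--
-- def group_separation(raw_data):
--     group_answers=[]
--     raw_data=[lines.strip("\n") for lines in raw_data]
--     collect_string=""
--     persons_in_group=0
--     #seperate group answers from raw_data
--     for lines in raw_data:
--         if lines=="":
--             common=common_answers(collect_string,persons_in_group)
--             group_answers.append(common)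
--             collect_string=""
--             persons_in_group=0
--         else:
--             collect_string+=lines
--             persons_in_group+=1
--     next
--     if collect_string!="":
--         common=common_answers(collect_string,persons_in_group)
--         group_answers.append(common)
--     return group_answers
-- ===== SOURCE B (Python) =====
-- def _common(seg):
--     text = "".join(seg)
--     counts = {}
--     for ch in text:
--         counts[ch] = counts.get(ch, 0) + 1
--     return "".join(ch for ch, k in counts.items() if k == len(seg))
--
-- def _split(ls):
--     if "" in ls:
--         i = ls.index("")
--         return [ls[:i]] + _split(ls[i + 1:])
--     return [ls] if ls else []
--
-- def group_separation(raw_data):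
--     lines = [line.strip("\n") for line in raw_data]
--     return [_common(g) for g in _split(lines)]
-- ===== Notes on version B (the rewrite author's own statement) =====
-- stated objective: faster
-- what changed: Replaces A's single stateful fold (accumulating a string, a person count and the output while rescanning the text with str.count per character) by recursive splitting at the index of each blank line into an explicit group list, then mapping a common-answers function that builds a counter dict in one pass and emits its items (first-occurrence key order) whose value equals the group size.
import Mathlib
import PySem

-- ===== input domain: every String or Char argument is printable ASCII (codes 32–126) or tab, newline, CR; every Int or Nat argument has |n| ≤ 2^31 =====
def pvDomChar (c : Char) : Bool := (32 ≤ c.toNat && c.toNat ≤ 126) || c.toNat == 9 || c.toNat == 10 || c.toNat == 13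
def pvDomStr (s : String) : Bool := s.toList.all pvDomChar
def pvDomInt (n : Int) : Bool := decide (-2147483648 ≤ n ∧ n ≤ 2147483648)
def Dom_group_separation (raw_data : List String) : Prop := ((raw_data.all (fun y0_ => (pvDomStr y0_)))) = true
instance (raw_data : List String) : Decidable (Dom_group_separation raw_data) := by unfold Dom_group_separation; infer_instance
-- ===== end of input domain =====

-- B replaces A's single stateful fold by recursive splitting at each blank line's index plus a
-- counter-items common-answers pass (objective: faster — the per-character str.count rescan disappears).

-- ===== PORT A =====
-- common_answers: append each char whose total count equals the person count, deduped by membership in the answer so far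
def pvCommonA (gs : List Char) (n : Int) : List Char :=
  gs.foldl (fun acc ch =>
    if ((gs.count ch : Int) == n && !(acc.contains ch)) then acc ++ [ch] else acc) []

-- the loop body of A: blank line closes the group, else accumulate the line and count the person
def pvStepA (st : List (List Char) × List Char × Int) (line : List Char) :
    List (List Char) × List Char × Int :=
  if line == [] then (st.1 ++ [pvCommonA st.2.1 st.2.2], [], 0)
  else (st.1, st.2.1 ++ line, st.2.2 + 1)

-- the trailing 'if collect_string != ""' of A
def pvFinA (st : List (List Char) × List Char × Int) : List (List Char) :=
  if st.2.1 ≠ [] then st.1 ++ [pvCommonA st.2.1 st.2.2] else st.1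

def group_separation (raw_data : List String) : List String :=
  let rd := raw_data.map (fun l => PySem.Chars.stripChars l.toList ['\n'])
  (pvFinA (rd.foldl pvStepA ([], [], 0))).map String.ofList

-- ===== PORT B =====
-- B's _common: build a counter dict over the joined text, then emit the keys (first-occurrence
-- order, as dict items) whose count equals the group length
def pvCommonB (g : List (List Char)) : List Char :=
  let text := g.flatten
  let counts := text.foldl (fun d c => PySem.Dict.modify d c 0 (· + 1)) PySem.Dict.empty
  ((counts.items.filter (fun p => p.2 == (g.length : Int))).map Prod.fst)

-- B's _split: '"" in ls' guards 'ls.index("")' (index? is some there); recurse on ls[i+1:]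
-- termination helper for pvSplitB: the tail slice is strictly shorter
theorem pvSliceFromLen (ls : List (List Char)) (i : Nat) (hls : ls ≠ []) :
    (PySem.List.slice ls (some ((i : Int) + 1)) none).length < ls.length := by
  rw [show ((i : Int) + 1) = (((i + 1 : Nat)) : Int) by push_cast; ring,
    PySem.List.slice_from_natCast]
  simp only [List.length_drop]
  have := List.length_pos_iff.mpr hls
  omega

def pvSplitB (ls : List (List Char)) : List (List (List Char)) :=
  if hmem : ([] : List Char) ∈ ls then
    let i : Nat := (PySem.List.index? ls ([] : List Char)).getD 0
    PySem.List.slice ls (some 0) (some (i : Int)) ::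
      pvSplitB (PySem.List.slice ls (some ((i : Int) + 1)) none)
  else if ls == [] then [] else [ls]
termination_by ls.length
decreasing_by exact pvSliceFromLen ls _ (List.ne_nil_of_mem hmem)

def group_separation_alt (raw_data : List String) : List String :=
  let lines := raw_data.map (fun l => PySem.Chars.stripChars l.toList ['\n'])
  (pvSplitB lines).map (fun g => String.ofList (pvCommonB g))

-- ===== PRECONDITION & SPEC =====
def Spec_group_separation (raw_data : List String) (out : List String) : Prop := out = group_separation_alt raw_data
instance (raw_data : List String) (out : List String) : Decidable (Spec_group_separation raw_data out) := by unfold Spec_group_separation; infer_instance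

-- ===== CLAIM (what is proved, stated in full; the proofs are below) =====
def Claim_equal_group_separation : Prop := ∀ (raw_data : List String), Dom_group_separation raw_data → Spec_group_separation raw_data (group_separation raw_data)

-- ===== LEMMAS AND PROOFS =====

-- A's dedup-by-membership fold is the filtered Set.add fold (invariant: acc = seen.filter p)
theorem pvFoldFilter (p : Char → Bool) (text : List Char) (s : List Char) :
    text.foldl (fun acc ch => if (p ch && !(acc.contains ch)) then acc ++ [ch] else acc)
      (s.filter p) =
    (text.foldl (fun a c => PySem.Set.add a c) s).filter p := by
  induction text generalizing s with
  | nil => rfl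
  | cons ch t ih =>
    simp only [List.foldl_cons]
    by_cases hp : p ch = true
    · by_cases hm : ch ∈ s
      · have h1 : ((s.filter p).contains ch) = true := by
          simp [List.mem_filter, hm, hp]
        rw [show (if (p ch && !((s.filter p).contains ch)) = true
              then (s.filter p) ++ [ch] else (s.filter p)) = s.filter p by
            rw [h1]; simp]
        rw [PySem.Set.add_of_mem hm]
        exact ih s
      · have h1 : ((s.filter p).contains ch) = false := by
          simp [List.mem_filter, hm]
        rw [PySem.Set.add_of_not_mem hm]
        rw [show (if (p ch && !((s.filter p).contains ch)) = true
              then (s.filter p) ++ [ch] else (s.filter p)) = (s ++ [ch]).filter p by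
            rw [h1]; simp [hp]]
        exact ih (s ++ [ch])
    · have hp' : p ch = false := by simpa using hp
      rw [show (if (p ch && !((s.filter p).contains ch)) = true
            then (s.filter p) ++ [ch] else (s.filter p)) = s.filter p by
          rw [hp']; simp]
      rw [PySem.Set.add_eq_ite]
      by_cases hm : ch ∈ s
      · rw [if_pos hm]; exact ih s
      · rw [if_neg hm]
        rw [show s.filter p = (s ++ [ch]).filter p by simp [hp']]
        exact ih (s ++ [ch])

-- B's common-answers equals A's on the concatenated group text
theorem pvCommon_eq (g : List (List Char)) :
    pvCommonB g = pvCommonA g.flatten (g.length : Int) := by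
  simp only [pvCommonB, pvCommonA]
  rw [← PySem.Dict.counter_eq_foldl, PySem.Dict.items_counter]
  rw [List.filter_map, List.map_map]
  have h := pvFoldFilter (fun ch => ((g.flatten.count ch : Int) == (g.length : Int))) g.flatten []
  simp only [List.filter_nil] at h
  rw [h, PySem.Set.ofList_eq_foldl]
  simp [Function.comp_def]

-- a blank-free run of A's loop only accumulates text and persons
theorem pvRunA (pre : List (List Char)) (hpre : ([] : List Char) ∉ pre)
    (ga : List (List Char)) (cs : List Char) (n : Int) :
    pre.foldl pvStepA (ga, cs, n) = (ga, cs ++ pre.flatten, n + pre.length) := by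
  induction pre generalizing cs n with
  | nil => simp
  | cons l t ih =>
    have hl : l ≠ [] := fun h => hpre (h ▸ List.mem_cons_self)
    simp only [List.foldl_cons, pvStepA, beq_iff_eq, if_neg hl]
    rw [ih (fun h => hpre (List.mem_cons_of_mem _ h))]
    simp only [List.flatten_cons, List.length_cons, Prod.mk.injEq, List.append_assoc,
      true_and]
    omega

-- main loop correspondence: A's fold from a fresh group state emits exactly B's split groups
-- (strong induction on the line count, following pvSplitB's recursion)
theorem pvLoopAux (N : Nat) : ∀ (ls : List (List Char)), ls.length ≤ N →
    ∀ (ga : List (List Char)),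
    pvFinA (ls.foldl pvStepA (ga, [], 0)) =
      ga ++ (pvSplitB ls).map (fun g => pvCommonA g.flatten (g.length : Int)) := by
  induction N with
  | zero =>
    intro ls hls ga
    have : ls = [] := List.length_eq_zero_iff.mp (Nat.le_zero.mp hls)
    subst this
    simp [pvSplitB, pvFinA]
  | succ N ihN =>
    intro ls hls ga
    cases h : PySem.List.index? ls ([] : List Char) with
    | some i =>
      obtain ⟨pre, suf, hsplit, hlen, hnotmem⟩ := (PySem.List.index?_eq_some_iff ls [] i).mp h
      have hmem : ([] : List Char) ∈ ls := by simp [hsplit]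
      rw [pvSplitB, dif_pos hmem]
      simp only [h, Option.getD_some]
      have hslice0 : PySem.List.slice ls (some (0 : Int)) (some (i : Int)) = pre := by
        rw [show (0 : Int) = ((0 : Nat) : Int) by rfl, PySem.List.slice_natCast, hsplit, ← hlen]
        simp
      have hslice1 : PySem.List.slice ls (some ((i : Int) + 1)) none = suf := by
        rw [show ((i : Int) + 1) = (((i + 1 : Nat)) : Int) by push_cast; ring,
          PySem.List.slice_from_natCast, hsplit, ← hlen]
        simp [List.drop_append]
      have hsuf : suf.length ≤ N := by
        have hlen2 : ls.length = pre.length + (suf.length + 1) := by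
          rw [hsplit]; simp
        omega
      rw [hslice0, hslice1, hsplit, List.foldl_append, pvRunA pre hnotmem ga [] 0]
      simp only [List.foldl_cons, pvStepA, beq_self_eq_true, if_pos, List.nil_append, zero_add]
      rw [ihN suf hsuf (ga ++ [pvCommonA pre.flatten (pre.length : Int)])]
      simp [List.append_assoc]
    | none =>
      have hnm : ([] : List Char) ∉ ls := (PySem.List.index?_eq_none_iff ls []).mp h
      rw [pvSplitB, dif_neg hnm]
      rw [pvRunA ls hnm ga [] 0]
      by_cases hnil : ls = []
      · subst hnil; simp [pvFinA]
      · have hfl : ls.flatten ≠ [] := by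
          intro hf
          rcases ls with _ | ⟨l, t⟩
          · exact hnil rfl
          · have hl : l ≠ [] := fun h' => hnm (h' ▸ List.mem_cons_self)
            exact hl (List.flatten_eq_nil_iff.mp hf l List.mem_cons_self)
        simp only [pvFinA, List.nil_append, zero_add, ne_eq, hfl, not_false_eq_true, if_pos]
        simp only [beq_iff_eq, hnil]
        rfl

-- ===== VERDICT (by name: the statement is the Claim_ definition above) =====
theorem group_separation_spec : Claim_equal_group_separation := by
  intro raw_data _
  unfold Spec_group_separation
  simp only [group_separation, group_separation_alt]
  rw [pvLoopAux (raw_data.map (fun l => PySem.Chars.stripChars l.toList ['\n'])).length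
    (raw_data.map (fun l => PySem.Chars.stripChars l.toList ['\n'])) le_rfl []]
  simp [List.map_map, Function.comp, pvCommon_eq]
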